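-- pv_equiv track=rewrite | github.com/hankyeolyu/vilab_hw | ex53.py | solution
-- ===== SOURCE A (Python) =====
-- def solution(k, m, score):
--     answer = 0
--     cnt = 0
--     score.sort(reverse=True)
--     for i in range(0, len(score)):
--         cnt += 1
--         if cnt == m:
--             cnt = 0
--             answer += score[i] * m
--     return answer
-- ===== SOURCE B (Python) =====
-- def solution(k, m, score):
--     score.sort(reverse=True)
--     if m < 1:
--         return 0
--     total = 0
--     rest = score
--     while len(rest) >= m:
--         total += rest[m - 1]
--         rest = rest[m:]
--     return m * total
-- ===== Notes on version B (the rewrite author's own statement) =====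
-- stated objective: alternative
-- what changed: A scans every element of the descending-sorted list with a modular counter, adding score[i]*m at each group boundary; B instead walks the sorted list in m-sized suffix chunks (a while loop over rest = rest[m:]), reads only each chunk's m-th element, and multiplies the sum by m once at the end.
import Mathlib
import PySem

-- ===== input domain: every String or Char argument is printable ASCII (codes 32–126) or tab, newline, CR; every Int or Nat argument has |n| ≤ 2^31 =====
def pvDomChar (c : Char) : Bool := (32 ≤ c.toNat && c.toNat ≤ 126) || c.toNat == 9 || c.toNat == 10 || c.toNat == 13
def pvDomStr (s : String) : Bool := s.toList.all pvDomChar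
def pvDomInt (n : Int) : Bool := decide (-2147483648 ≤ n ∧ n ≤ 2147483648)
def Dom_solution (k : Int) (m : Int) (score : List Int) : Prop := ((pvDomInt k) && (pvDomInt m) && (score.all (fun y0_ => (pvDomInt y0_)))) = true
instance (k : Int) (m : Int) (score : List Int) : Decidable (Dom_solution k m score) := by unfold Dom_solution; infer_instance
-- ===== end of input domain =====

-- B replaces A's full scan with a modular counter by a while loop over m-sized
-- suffix chunks, reading only each chunk's m-th element and multiplying the sum
-- by m once at the end (objective: simpler). Both versions sort `score` in place;
-- the equivalence proved here is about the return value (the mutation is identical).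

-- ===== PORT A =====
def solution (k : Int) (m : Int) (score : List Int) : Int :=
  let s := PySem.List.sorted score (fun x => x) true
  let r := (PySem.List.pyRange 0 (s.length : Int) 1).foldl
    (fun (p : Int × Int) i =>
      let cnt := p.2 + 1
      if cnt = m then (p.1 + PySem.List.pyGetD s i 0 * m, 0) else (p.1, cnt))
    (0, 0)
  r.1

-- ===== PORT B =====
-- the `while len(rest) >= m` loop of Source B; the extra `1 ≤ m` conjunct only makes the
-- recursion total (the caller enters the loop only after `if m < 1: return 0`)
def pvChunkLoop (m : Int) (rest : List Int) (total : Int) : Int :=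
  if h : 1 ≤ m ∧ m ≤ (rest.length : Int) then
    pvChunkLoop m (PySem.List.slice rest (some m) none) (total + PySem.List.pyGetD rest (m - 1) 0)
  else total
termination_by rest.length
decreasing_by
  rw [PySem.List.slice_from rest (show (0:Int) ≤ m by omega)]
  simp only [List.length_drop]
  omega

def solution_alt (k : Int) (m : Int) (score : List Int) : Int :=
  let s := PySem.List.sorted score (fun x => x) true
  if m < 1 then 0 else m * pvChunkLoop m s 0

-- ===== PRECONDITION & SPEC =====
def Spec_solution (k : Int) (m : Int) (score : List Int) (out : Int) : Prop := out = solution_alt k m score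
instance (k : Int) (m : Int) (score : List Int) (out : Int) : Decidable (Spec_solution k m score out) := by unfold Spec_solution; infer_instance

-- ===== CLAIM (what is proved, stated in full; the proofs are below) =====
def Claim_equal_solution : Prop := ∀ (k : Int) (m : Int) (score : List Int), Dom_solution k m score → Spec_solution k m score (solution k m score)

-- ===== LEMMAS AND PROOFS =====

-- A's loop body as a function of the current element
def pvStep (m : Int) (p : Int × Int) (x : Int) : Int × Int :=
  if p.2 + 1 = m then (p.1 + x * m, 0) else (p.1, p.2 + 1)

lemma pvChunkLoop_add (m : Int) : ∀ (n : ℕ) (rest : List Int), rest.length ≤ n → ∀ (t : Int),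
    pvChunkLoop m rest t = t + pvChunkLoop m rest 0 := by
  have hnil : ∀ t : Int, pvChunkLoop m [] t = t := by
    intro t
    rw [pvChunkLoop, dif_neg (by simp; omega)]
  intro n
  induction n with
  | zero =>
    intro rest hlen t
    have : rest = [] := List.eq_nil_of_length_eq_zero (Nat.le_zero.mp hlen)
    subst this
    rw [hnil, hnil]
    ring
  | succ n ih =>
    intro rest hlen t
    by_cases h : 1 ≤ m ∧ m ≤ (rest.length : Int)
    · conv_lhs => rw [pvChunkLoop]
      conv_rhs => rw [pvChunkLoop]
      rw [dif_pos h, dif_pos h]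
      rw [PySem.List.slice_from rest (show (0:Int) ≤ m by omega)]
      have hd : (rest.drop m.toNat).length ≤ n := by
        simp only [List.length_drop]; omega
      rw [ih _ hd, ih _ hd (0 + _)]
      ring
    · conv_lhs => rw [pvChunkLoop]
      conv_rhs => rw [pvChunkLoop]
      rw [dif_neg h, dif_neg h]
      ring
-- m < 1: the trigger never fires
lemma pvFold_nontrigger (m : Int) (hm : m < 1) :
    ∀ (ys : List Int) (ans c : Int), 0 ≤ c →
      ys.foldl (pvStep m) (ans, c) = (ans, c + ys.length) := by
  intro ys
  induction ys with
  | nil => intro ans c _; simp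
  | cons x xs ih =>
    intro ans c hc
    simp only [List.foldl_cons, pvStep]
    rw [if_neg (by omega)]
    rw [ih ans (c + 1) (by omega)]
    simp only [List.length_cons]
    congr 1
    push_cast
    ring

-- fewer than the m - c missing elements: no trigger, the counter just advances
lemma pvFold_short (m : Int) :
    ∀ (zs : List Int) (ans c : Int), 0 ≤ c → (zs.length : Int) + c < m →
      zs.foldl (pvStep m) (ans, c) = (ans, c + zs.length) := by
  intro zs
  induction zs with
  | nil => intro ans c _ _; simp
  | cons x xs ih =>
    intro ans c hc hlt
    simp only [List.length_cons] at hlt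
    simp only [List.foldl_cons, pvStep]
    rw [if_neg (by push_cast at hlt ⊢; omega)]
    rw [ih ans (c + 1) (by omega) (by push_cast at hlt ⊢; omega)]
    simp only [List.length_cons]
    congr 1
    push_cast
    ring

-- a block of exactly the m - c missing elements ends with a trigger on its last element
lemma pvFold_block (m : Int) :
    ∀ (zs : List Int) (ans c : Int) (h : zs ≠ []), 0 ≤ c → (zs.length : Int) + c = m →
      zs.foldl (pvStep m) (ans, c) = (ans + zs.getLast h * m, 0) := by
  intro zs
  induction zs with
  | nil => intro ans c h; exact absurd rfl h
  | cons x xs ih =>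
    intro ans c h hc heq
    simp only [List.length_cons] at heq
    by_cases hx : xs = []
    · subst hx
      simp only [List.foldl_cons, List.foldl_nil, pvStep, List.getLast_singleton]
      rw [if_pos (by simp at heq ⊢; omega)]
    · have hlen : 1 ≤ (xs.length : Int) := by
        have := List.length_pos_iff.mpr hx; omega
      simp only [List.foldl_cons, pvStep]
      rw [if_neg (by push_cast at heq ⊢; omega)]
      rw [ih ans (c + 1) hx (by omega) (by push_cast at heq ⊢; omega)]
      rw [List.getLast_cons hx]

lemma pvFold_main (m : Int) (hm : 1 ≤ m) :
    ∀ (n : ℕ) (ys : List Int) (ans : Int), ys.length ≤ n →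
      (ys.foldl (pvStep m) (ans, 0)).1 = ans + m * pvChunkLoop m ys 0 := by
  intro n
  induction n with
  | zero =>
    intro ys ans hlen
    have : ys = [] := List.eq_nil_of_length_eq_zero (Nat.le_zero.mp hlen)
    subst this
    rw [pvChunkLoop, dif_neg (by simp; omega)]
    simp
  | succ n ih =>
    intro ys ans hlen
    rw [pvChunkLoop]
    by_cases hc : m ≤ (ys.length : Int)
    · rw [dif_pos ⟨hm, hc⟩]
      have hmn : 1 ≤ m.toNat := by omega
      have hml : m.toNat ≤ ys.length := by omega
      have htk : (ys.take m.toNat).length = m.toNat := by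
        simp [List.length_take, Nat.min_eq_left hml]
      have hne : ys.take m.toNat ≠ [] := by
        intro h0; rw [h0] at htk; simp at htk; omega
      have hsplit := List.take_append_drop m.toNat ys
      conv_lhs => rw [← hsplit]
      rw [List.foldl_append]
      rw [pvFold_block m _ ans 0 hne le_rfl (by rw [htk]; omega)]
      have hdl : (ys.drop m.toNat).length ≤ n := by
        simp only [List.length_drop]; omega
      rw [ih _ _ hdl]
      have hadd := pvChunkLoop_add m (ys.drop m.toNat).length (ys.drop m.toNat) le_rfl
        (0 + PySem.List.pyGetD ys (m - 1) 0)
      rw [PySem.List.slice_from ys (show (0:Int) ≤ m by omega), hadd]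
      have hgl : (ys.take m.toNat).getLast hne = PySem.List.pyGetD ys (m - 1) 0 := by
        rw [PySem.List.pyGetD_eq_getElem ys (i := m - 1) (0 : Int) (by omega) (by omega)]
        rw [List.getLast_eq_getElem]
        rw [List.getElem_take]
        congr 1
        omega
      rw [hgl]
      ring
    · rw [dif_neg (by omega)]
      rw [pvFold_short m ys ans 0 le_rfl (by omega)]
      ring

-- ===== VERDICT (by name: the statement is the Claim_ definition above) =====
theorem solution_spec : Claim_equal_solution := by
  intro k m score _
  unfold Spec_solution solution solution_alt
  set s := PySem.List.sorted score (fun x => x) true with hs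
  simp only []
  rw [show (fun (p : Int × Int) (i : Int) =>
        let cnt := p.2 + 1
        if cnt = m then (p.1 + PySem.List.pyGetD s i 0 * m, 0) else (p.1, cnt))
      = fun p i => pvStep m p (PySem.List.pyGetD s i 0) from rfl]
  rw [PySem.List.foldl_pyRange_zero_pyGetD' s 0 (pvStep m) ((0 : Int), (0 : Int))]
  by_cases hm : m < 1
  · rw [if_pos hm]
    rw [pvFold_nontrigger m hm s 0 0 le_rfl]
  · rw [if_neg hm]
    rw [pvFold_main m (by omega) s.length s 0 le_rfl]
    ring
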